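-- pv_equiv track=rewrite | github.com/gahyoenj/baekjoon | 프로그래머스/2/152996. 시소 짝꿍/시소 짝꿍.py | solution
-- ===== SOURCE A (Python) =====
-- def solution(weights):
--     answer = 0
--
--     weights.sort()
--     dic = {}
--
--     for w in weights:
--         if w in dic:
--             answer += dic[w]
--
--         if w% 2==0 and w//2 in dic:
--             answer += dic[w//2]
--
--         if (w*2) % 3 == 0 and (w*2) //3 in dic:
--             answer += dic[(w*2) // 3]
--
--         if (w*3) % 4 == 0 and (w*3) // 4 in dic:
--             answer += dic[(w*3) // 4]
--
--         dic[w] = dic.get(w, 0) + 1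
--
--
--     return answer
-- ===== SOURCE B (Python) =====
-- RATIOS = ((1, 2), (2, 3), (3, 4))
--
-- def solution(weights):
--     answer = 0
--     seen = {}
--     for w in weights:
--         answer += seen.get(w, 0)
--         for n, d in RATIOS:
--             if (w * n) % d == 0:
--                 t = (w * n) // d
--                 if t < w:
--                     answer += seen.get(t, 0)
--             if (w * d) % n == 0:
--                 u = (w * d) // n
--                 if u > w:
--                     answer += seen.get(u, 0)
--         seen[w] = seen.get(w, 0) + 1
--     return answer
-- ===== Notes on version B (the rewrite author's own statement) =====
-- stated objective: alternative
-- what changed: B eliminates A's sort entirely: one pass over the original order with a running frequency dict, looking up ratio partners in both directions (smaller target t<w and larger target u>w) instead of relying on sorted order to make all partners appear earlier.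
-- intended difference: On lists containing at least two zeros A counts each pair of zeros four times (all four ratio checks hit the same key 0), while B counts such a pair once, which is the intended count of seesaw partners. — e.g. on solution([0, 0]): A returns 4, B returns 1
import Mathlib
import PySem

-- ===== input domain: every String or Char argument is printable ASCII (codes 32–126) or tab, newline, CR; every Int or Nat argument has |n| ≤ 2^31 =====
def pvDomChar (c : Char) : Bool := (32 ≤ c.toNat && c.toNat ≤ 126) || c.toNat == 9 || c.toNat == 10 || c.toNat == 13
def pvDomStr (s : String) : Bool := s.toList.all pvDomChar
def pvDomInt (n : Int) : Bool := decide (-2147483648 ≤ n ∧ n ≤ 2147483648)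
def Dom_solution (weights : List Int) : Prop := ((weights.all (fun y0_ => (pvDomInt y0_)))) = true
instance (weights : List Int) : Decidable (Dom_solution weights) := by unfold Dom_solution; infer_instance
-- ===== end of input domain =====

-- B drops A's sort and scans once in original order, looking up ratio partners in both
-- directions in a running frequency dict; equivalence is about the RETURN value only
-- (Python A sorts its argument in place, B does not mutate it).

-- ===== PORT A =====
def stepA (st : Int × PySem.Dict Int Int) (w : Int) : Int × PySem.Dict Int Int :=
  let ans := st.1
  let dic := st.2
  let ans := if dic.contains w then ans + dic.getD w 0 else ans
  let ans := if PySem.Int.mod w 2 = 0 ∧ dic.contains (PySem.Int.floordiv w 2) then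
               ans + dic.getD (PySem.Int.floordiv w 2) 0 else ans
  let ans := if PySem.Int.mod (w * 2) 3 = 0 ∧ dic.contains (PySem.Int.floordiv (w * 2) 3) then
               ans + dic.getD (PySem.Int.floordiv (w * 2) 3) 0 else ans
  let ans := if PySem.Int.mod (w * 3) 4 = 0 ∧ dic.contains (PySem.Int.floordiv (w * 3) 4) then
               ans + dic.getD (PySem.Int.floordiv (w * 3) 4) 0 else ans
  (ans, dic.insert w (dic.getD w 0 + 1))

def solution (weights : List Int) : Int :=
  ((PySem.List.sorted weights (fun x => x) false).foldl stepA (0, PySem.Dict.empty)).1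

-- ===== PORT B =====
def ratiosB : List (Int × Int) := [(1, 2), (2, 3), (3, 4)]

def stepB (st : Int × PySem.Dict Int Int) (w : Int) : Int × PySem.Dict Int Int :=
  let seen := st.2
  let ans := st.1 + seen.getD w 0
  let ans := ratiosB.foldl (fun ans nd =>
    let n := nd.1
    let d := nd.2
    let ans := if PySem.Int.mod (w * n) d = 0 then
                 (let t := PySem.Int.floordiv (w * n) d
                  if t < w then ans + seen.getD t 0 else ans)
               else ans
    let ans := if PySem.Int.mod (w * d) n = 0 then
                 (let u := PySem.Int.floordiv (w * d) n
                  if w < u then ans + seen.getD u 0 else ans)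
               else ans
    ans) ans
  (ans, seen.insert w (seen.getD w 0 + 1))

def solution_alt (weights : List Int) : Int :=
  (weights.foldl stepB (0, PySem.Dict.empty)).1

-- ===== PRECONDITION & SPEC =====
-- On lists with at least two zeros A counts each pair of zeros four times (all four ratio
-- checks hit the key 0), while B counts such a pair once, the intended count of partners.
def D_solution (weights : List Int) : Prop := 2 ≤ weights.count 0
instance (weights : List Int) : Decidable (D_solution weights) := by unfold D_solution; infer_instance

def Spec_solution (weights : List Int) (out : Int) : Prop := ¬ D_solution weights → out = solution_alt weights
instance (weights : List Int) (out : Int) : Decidable (Spec_solution weights out) := by unfold Spec_solution; infer_instance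

def pvDiffWitness_solution : List Int := [0, 0]
def pvDiffWitnessOut_solution : Int × Int := (4, 1)

-- ===== CLAIM (what is proved, stated in full; the proofs are below) =====
def Claim_unchanged_solution : Prop := ∀ (weights : List Int), Dom_solution weights → Spec_solution weights (solution weights)
def Claim_changed_solution : Prop := Dom_solution (pvDiffWitness_solution) ∧ D_solution (pvDiffWitness_solution) ∧ solution (pvDiffWitness_solution) = pvDiffWitnessOut_solution.1 ∧ solution_alt (pvDiffWitness_solution) = pvDiffWitnessOut_solution.2 ∧ pvDiffWitnessOut_solution.1 ≠ pvDiffWitnessOut_solution.2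
def Claim_exact_solution : Prop := ∀ (weights : List Int), Dom_solution weights → D_solution weights → solution weights ≠ solution_alt weights

-- ===== LEMMAS AND PROOFS =====

-- 0/1 indicator
def ind (p : Prop) [Decidable p] : Int := if p then 1 else 0

lemma ind_nonneg (p : Prop) [Decidable p] : 0 ≤ ind p := by
  unfold ind; split <;> norm_num

-- contribution of an earlier element x to A's step at current element w
def gA (x w : Int) : Int :=
  ind (x = w)
  + ind (PySem.Int.mod w 2 = 0 ∧ x = PySem.Int.floordiv w 2)
  + ind (PySem.Int.mod (w * 2) 3 = 0 ∧ x = PySem.Int.floordiv (w * 2) 3)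
  + ind (PySem.Int.mod (w * 3) 4 = 0 ∧ x = PySem.Int.floordiv (w * 3) 4)

-- contribution of an earlier element x to B's step at current element w
def gB (x w : Int) : Int :=
  ind (x = w)
  + ind ((PySem.Int.mod (w * 1) 2 = 0 ∧ PySem.Int.floordiv (w * 1) 2 < w) ∧ x = PySem.Int.floordiv (w * 1) 2)
  + ind ((PySem.Int.mod (w * 2) 1 = 0 ∧ w < PySem.Int.floordiv (w * 2) 1) ∧ x = PySem.Int.floordiv (w * 2) 1)
  + ind ((PySem.Int.mod (w * 2) 3 = 0 ∧ PySem.Int.floordiv (w * 2) 3 < w) ∧ x = PySem.Int.floordiv (w * 2) 3)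
  + ind ((PySem.Int.mod (w * 3) 2 = 0 ∧ w < PySem.Int.floordiv (w * 3) 2) ∧ x = PySem.Int.floordiv (w * 3) 2)
  + ind ((PySem.Int.mod (w * 3) 4 = 0 ∧ PySem.Int.floordiv (w * 3) 4 < w) ∧ x = PySem.Int.floordiv (w * 3) 4)
  + ind ((PySem.Int.mod (w * 4) 3 = 0 ∧ w < PySem.Int.floordiv (w * 4) 3) ∧ x = PySem.Int.floordiv (w * 4) 3)

-- exact-division characterisation: "a % d == 0 and x == a // d" is the linear equation x*d = a
lemma modfloor_iff (a x d : Int) (hd : 0 < d) :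
    (PySem.Int.mod a d = 0 ∧ x = PySem.Int.floordiv a d) ↔ x * d = a := by
  rw [PySem.Int.mod_eq_zero_iff_dvd]
  constructor
  · rintro ⟨⟨k, rfl⟩, rfl⟩
    rw [show d * k = k * d by ring, (PySem.Int.floordiv_eq_iff_of_pos hd).2 ⟨le_refl _, by nlinarith⟩]
  · rintro rfl
    exact ⟨⟨x, by ring⟩, ((PySem.Int.floordiv_eq_iff_of_pos hd).2 ⟨le_refl _, by nlinarith⟩).symm⟩

lemma modfloor_lt_iff (a x w d : Int) (hd : 0 < d) :
    ((PySem.Int.mod a d = 0 ∧ PySem.Int.floordiv a d < w) ∧ x = PySem.Int.floordiv a d) ↔ (x * d = a ∧ x < w) := by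
  constructor
  · rintro ⟨⟨h1, h2⟩, h3⟩
    exact ⟨(modfloor_iff a x d hd).1 ⟨h1, h3⟩, h3 ▸ h2⟩
  · rintro ⟨h1, h2⟩
    obtain ⟨h1', h3⟩ := (modfloor_iff a x d hd).2 h1
    exact ⟨⟨h1', h3 ▸ h2⟩, h3⟩

lemma modfloor_gt_iff (a x w d : Int) (hd : 0 < d) :
    ((PySem.Int.mod a d = 0 ∧ w < PySem.Int.floordiv a d) ∧ x = PySem.Int.floordiv a d) ↔ (x * d = a ∧ w < x) := by
  constructor
  · rintro ⟨⟨h1, h2⟩, h3⟩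
    exact ⟨(modfloor_iff a x d hd).1 ⟨h1, h3⟩, h3 ▸ h2⟩
  · rintro ⟨h1, h2⟩
    obtain ⟨h1', h3⟩ := (modfloor_iff a x d hd).2 h1
    exact ⟨⟨h1', h3 ▸ h2⟩, h3⟩

lemma ind_congr {p q : Prop} [Decidable p] [Decidable q] (h : p ↔ q) : ind p = ind q := by
  simp [ind, h]

lemma gA_eq (x w : Int) :
    gA x w = ind (x = w) + ind (x * 2 = w) + ind (x * 3 = w * 2) + ind (x * 4 = w * 3) := by
  unfold gA
  rw [ind_congr (modfloor_iff w x 2 (by norm_num)),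
      ind_congr (modfloor_iff (w * 2) x 3 (by norm_num)),
      ind_congr (modfloor_iff (w * 3) x 4 (by norm_num))]

lemma gB_eq (x w : Int) :
    gB x w = ind (x = w)
      + ind (x * 2 = w * 1 ∧ x < w) + ind (x * 1 = w * 2 ∧ w < x)
      + ind (x * 3 = w * 2 ∧ x < w) + ind (x * 2 = w * 3 ∧ w < x)
      + ind (x * 4 = w * 3 ∧ x < w) + ind (x * 3 = w * 4 ∧ w < x) := by
  unfold gB
  rw [ind_congr (modfloor_lt_iff (w * 1) x w 2 (by norm_num)),
      ind_congr (modfloor_gt_iff (w * 2) x w 1 (by norm_num)),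
      ind_congr (modfloor_lt_iff (w * 2) x w 3 (by norm_num)),
      ind_congr (modfloor_gt_iff (w * 3) x w 2 (by norm_num)),
      ind_congr (modfloor_lt_iff (w * 3) x w 4 (by norm_num)),
      ind_congr (modfloor_gt_iff (w * 4) x w 3 (by norm_num))]

lemma gB_symm (x w : Int) : gB x w = gB w x := by
  rw [gB_eq x w, gB_eq w x]
  rw [ind_congr (show (x = w) ↔ (w = x) by omega),
      ind_congr (show (x * 2 = w * 1 ∧ x < w) ↔ (w * 1 = x * 2 ∧ x < w) by omega),
      ind_congr (show (x * 1 = w * 2 ∧ w < x) ↔ (w * 2 = x * 1 ∧ w < x) by omega),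
      ind_congr (show (x * 3 = w * 2 ∧ x < w) ↔ (w * 2 = x * 3 ∧ x < w) by omega),
      ind_congr (show (x * 2 = w * 3 ∧ w < x) ↔ (w * 3 = x * 2 ∧ w < x) by omega),
      ind_congr (show (x * 4 = w * 3 ∧ x < w) ↔ (w * 3 = x * 4 ∧ x < w) by omega),
      ind_congr (show (x * 3 = w * 4 ∧ w < x) ↔ (w * 4 = x * 3 ∧ w < x) by omega)]
  ring

-- pointwise on ordered pairs (x ≤ w): A's and B's contributions differ by 3 exactly on the zero pair
set_option maxHeartbeats 1000000 in
lemma gA_sub_gB (x w : Int) (hle : x ≤ w) :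
    gA x w = gB x w + 3 * ind (x = 0 ∧ w = 0) := by
  rw [gA_eq, gB_eq]
  simp only [ind]
  split_ifs <;> omega

-- pair sums: PS F seen l accumulates F(earlier, current) over the run l with history seen
def PS (F : Int → Int → Int) : List Int → List Int → Int
  | _, [] => 0
  | seen, w :: ws => (seen.map (fun x => F x w)).sum + PS F (seen ++ [w]) ws

def PF (F : Int → Int → Int) : List Int → Int
  | [] => 0
  | w :: ws => (ws.map (fun y => F w y)).sum + PF F ws

lemma PS_eq (F : Int → Int → Int) (l : List Int) : ∀ seen : List Int,
    PS F seen l = (l.map (fun w => (seen.map (fun x => F x w)).sum)).sum + PF F l := by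
  induction l with
  | nil => intro seen; simp [PS, PF]
  | cons w ws ih =>
    intro seen
    have h1 : (fun w1 => (((seen ++ [w]).map (fun x => F x w1)).sum))
        = fun w1 => (seen.map (fun x => F x w1)).sum + F w w1 := by
      funext w1; simp
    have h2 : (ws.map (fun w1 => (((seen ++ [w]).map (fun x => F x w1)).sum))).sum
        = (ws.map (fun w1 => (seen.map (fun x => F x w1)).sum)).sum + (ws.map (fun y => F w y)).sum := by
      rw [h1, PySem.List.sum_map_add_int]
    simp only [PS, PF, ih (seen ++ [w]), h2, List.map_cons, List.sum_cons]
    ring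

lemma PS_nil_eq (F : Int → Int → Int) (l : List Int) : PS F [] l = PF F l := by
  rw [PS_eq]; simp

lemma PF_perm (F : Int → Int → Int) (hsym : ∀ x y, F x y = F y x)
    {l₁ l₂ : List Int} (h : l₁.Perm l₂) : PF F l₁ = PF F l₂ := by
  induction h with
  | nil => rfl
  | cons x h ih => simp only [PF, ih, (h.map (fun y => F x y)).sum_eq]
  | swap x y l =>
    simp only [PF, List.map_cons, List.sum_cons]
    rw [hsym y x]
    ring
  | trans _ _ ih₁ ih₂ => rw [ih₁, ih₂]

-- counting sums
lemma count_sum (seen : List Int) (t : Int) :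
    (seen.map (fun x => ind (x = t))).sum = seen.count t := by
  induction seen with
  | nil => simp
  | cons a l ih =>
    simp only [List.map_cons, List.sum_cons, List.count_cons, ih]
    push_cast
    by_cases h : a = t <;> simp [ind, h] <;> omega

lemma cond_count_sum (seen : List Int) (p : Prop) [Decidable p] (t : Int) :
    (seen.map (fun x => ind (p ∧ x = t))).sum = if p then (seen.count t : Int) else 0 := by
  by_cases hp : p
  · rw [if_pos hp, ← count_sum seen t]
    congr 1
    exact List.map_congr_left (fun x _ => by simp [ind, hp])
  · rw [if_neg hp]
    have : (seen.map (fun x => ind (p ∧ x = t))) = seen.map (fun _ => (0:Int)) :=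
      List.map_congr_left (fun x _ => by simp [ind, hp])
    simp [this]

lemma sum_gA (seen : List Int) (w : Int) :
    (seen.map (fun x => gA x w)).sum
      = (seen.count w : Int)
        + (if PySem.Int.mod w 2 = 0 then (seen.count (PySem.Int.floordiv w 2) : Int) else 0)
        + (if PySem.Int.mod (w * 2) 3 = 0 then (seen.count (PySem.Int.floordiv (w * 2) 3) : Int) else 0)
        + (if PySem.Int.mod (w * 3) 4 = 0 then (seen.count (PySem.Int.floordiv (w * 3) 4) : Int) else 0) := by
  unfold gA
  rw [PySem.List.sum_map_add_int, PySem.List.sum_map_add_int, PySem.List.sum_map_add_int,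
      count_sum, cond_count_sum, cond_count_sum, cond_count_sum]

lemma sum_gB (seen : List Int) (w : Int) :
    (seen.map (fun x => gB x w)).sum
      = (seen.count w : Int)
        + (if PySem.Int.mod (w * 1) 2 = 0 ∧ PySem.Int.floordiv (w * 1) 2 < w then (seen.count (PySem.Int.floordiv (w * 1) 2) : Int) else 0)
        + (if PySem.Int.mod (w * 2) 1 = 0 ∧ w < PySem.Int.floordiv (w * 2) 1 then (seen.count (PySem.Int.floordiv (w * 2) 1) : Int) else 0)
        + (if PySem.Int.mod (w * 2) 3 = 0 ∧ PySem.Int.floordiv (w * 2) 3 < w then (seen.count (PySem.Int.floordiv (w * 2) 3) : Int) else 0)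
        + (if PySem.Int.mod (w * 3) 2 = 0 ∧ w < PySem.Int.floordiv (w * 3) 2 then (seen.count (PySem.Int.floordiv (w * 3) 2) : Int) else 0)
        + (if PySem.Int.mod (w * 3) 4 = 0 ∧ PySem.Int.floordiv (w * 3) 4 < w then (seen.count (PySem.Int.floordiv (w * 3) 4) : Int) else 0)
        + (if PySem.Int.mod (w * 4) 3 = 0 ∧ w < PySem.Int.floordiv (w * 4) 3 then (seen.count (PySem.Int.floordiv (w * 4) 3) : Int) else 0) := by
  unfold gB
  rw [PySem.List.sum_map_add_int, PySem.List.sum_map_add_int, PySem.List.sum_map_add_int,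
      PySem.List.sum_map_add_int, PySem.List.sum_map_add_int, PySem.List.sum_map_add_int,
      count_sum, cond_count_sum, cond_count_sum, cond_count_sum, cond_count_sum,
      cond_count_sum, cond_count_sum]

-- dict-lookup shapes over a counter
lemma add_lookupA (seen : List Int) (ans t : Int) (P : Prop) [Decidable P] :
    (if P ∧ (PySem.Dict.counter seen).contains t = true then ans + (PySem.Dict.counter seen).getD t 0 else ans)
      = ans + (if P then (seen.count t : Int) else 0) := by
  by_cases hP : P
  · by_cases hc : (PySem.Dict.counter seen).contains t = true
    · simp [hP, hc, PySem.Dict.getD_counter]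
    · have hm : t ∉ seen := by
        rw [PySem.Dict.contains_counter] at hc; simpa using hc
      simp [hP, hc, List.count_eq_zero.2 hm]
  · simp [hP]

lemma add_lookup0 (seen : List Int) (ans t : Int) :
    (if (PySem.Dict.counter seen).contains t = true then ans + (PySem.Dict.counter seen).getD t 0 else ans)
      = ans + (seen.count t : Int) := by
  by_cases hc : (PySem.Dict.counter seen).contains t = true
  · simp [hc, PySem.Dict.getD_counter]
  · have hm : t ∉ seen := by
      rw [PySem.Dict.contains_counter] at hc; simpa using hc
    simp [hc, List.count_eq_zero.2 hm]

lemma add_guard (ans v : Int) (P Q : Prop) [Decidable P] [Decidable Q] :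
    (if P then (if Q then ans + v else ans) else ans) = ans + (if P ∧ Q then v else 0) := by
  by_cases hP : P <;> by_cases hQ : Q <;> simp [hP, hQ]

lemma counter_snd (seen : List Int) (w : Int) :
    (PySem.Dict.counter seen).insert w ((PySem.Dict.counter seen).getD w 0 + 1)
      = PySem.Dict.counter (seen ++ [w]) := by
  rw [← PySem.Dict.foldl_insert_getD_add_one_eq_counter (seen ++ [w]), List.foldl_append,
      PySem.Dict.foldl_insert_getD_add_one_eq_counter, List.foldl_cons, List.foldl_nil]

lemma stepA_counter (seen : List Int) (ans w : Int) :
    stepA (ans, PySem.Dict.counter seen) w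
      = (ans + (seen.map (fun x => gA x w)).sum, PySem.Dict.counter (seen ++ [w])) := by
  simp only [stepA, Prod.mk.injEq]
  refine ⟨?_, counter_snd seen w⟩
  rw [sum_gA, add_lookupA, add_lookupA, add_lookupA, add_lookup0]
  ring

lemma stepB_counter (seen : List Int) (ans w : Int) :
    stepB (ans, PySem.Dict.counter seen) w
      = (ans + (seen.map (fun x => gB x w)).sum, PySem.Dict.counter (seen ++ [w])) := by
  simp only [stepB, ratiosB, List.foldl_cons, List.foldl_nil, Prod.mk.injEq]
  refine ⟨?_, counter_snd seen w⟩
  rw [sum_gB]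
  simp only [PySem.Dict.getD_counter]
  rw [add_guard, add_guard, add_guard, add_guard, add_guard, add_guard]
  ring

lemma foldl_step_eq (step : Int × PySem.Dict Int Int → Int → Int × PySem.Dict Int Int)
    (F : Int → Int → Int)
    (hstep : ∀ seen ans w, step (ans, PySem.Dict.counter seen) w
      = (ans + (seen.map (fun x => F x w)).sum, PySem.Dict.counter (seen ++ [w])))
    (l : List Int) : ∀ (seen : List Int) (ans : Int),
    (l.foldl step (ans, PySem.Dict.counter seen)).1 = ans + PS F seen l := by
  induction l with
  | nil => intro seen ans; simp [PS]
  | cons w ws ih =>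
    intro seen ans
    simp only [List.foldl_cons, hstep, PS, ih (seen ++ [w])]
    omega

lemma solution_eq_PF (weights : List Int) :
    solution weights = PF gA (PySem.List.sorted weights (fun x => x) false) := by
  have h0 : PySem.Dict.counter ([] : List Int) = (PySem.Dict.empty : PySem.Dict Int Int) := rfl
  unfold solution
  rw [← h0, foldl_step_eq stepA gA stepA_counter _ [] 0, PS_nil_eq]
  omega

lemma solution_alt_eq_PF (weights : List Int) :
    solution_alt weights = PF gB weights := by
  have h0 : PySem.Dict.counter ([] : List Int) = (PySem.Dict.empty : PySem.Dict Int Int) := rfl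
  unfold solution_alt
  rw [← h0, foldl_step_eq stepB gB stepB_counter _ [] 0, PS_nil_eq]
  omega

lemma map_sum_split (w : Int) (ws : List Int) (h : ∀ y ∈ ws, w ≤ y) :
    (ws.map (fun y => gA w y)).sum
      = (ws.map (fun y => gB w y)).sum + 3 * (ws.map (fun y => ind (w = 0 ∧ y = 0))).sum := by
  induction ws with
  | nil => simp
  | cons a l ih =>
    simp only [List.map_cons, List.sum_cons]
    rw [gA_sub_gB w a (h a (List.mem_cons_self)), ih (fun y hy => h y (List.mem_cons_of_mem _ hy))]
    ring

lemma PF_sorted_split (s : List Int) (hs : s.Pairwise (· ≤ ·)) :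
    PF gA s = PF gB s + 3 * PF (fun x y => ind (x = 0 ∧ y = 0)) s := by
  induction s with
  | nil => simp [PF]
  | cons w ws ih =>
    have hhead : ∀ y ∈ ws, w ≤ y := (List.pairwise_cons.1 hs).1
    have htail := (List.pairwise_cons.1 hs).2
    simp only [PF, ih htail, map_sum_split w ws hhead]
    ring

lemma count_cons' (a t : Int) (l : List Int) :
    (a :: l).count t = l.count t + (if a = t then 1 else 0) := by
  rw [List.count_cons]
  by_cases h : a = t
  · subst h; simp
  · have h' : ¬ t = a := fun e => h e.symm
    simp [h, h']

lemma PF_zero_pairs_nonneg (s : List Int) :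
    0 ≤ PF (fun x y => ind (x = 0 ∧ y = 0)) s := by
  induction s with
  | nil => simp [PF]
  | cons a l ih =>
    have h1 : 0 ≤ (l.map (fun y => ind (a = 0 ∧ y = 0))).sum :=
      List.sum_nonneg (by
        intro x hx
        obtain ⟨y, _, rfl⟩ := List.mem_map.1 hx
        exact ind_nonneg _)
    simp only [PF]
    omega

lemma PF_zero_pairs_pos (s : List Int) (h2 : 2 ≤ s.count 0) :
    1 ≤ PF (fun x y => ind (x = 0 ∧ y = 0)) s := by
  induction s with
  | nil => simp at h2
  | cons a l ih =>
    simp only [PF]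
    by_cases ha : a = 0
    · have hmem : (0:Int) ∈ l := by
        rw [count_cons', if_pos ha] at h2
        rw [← List.count_pos_iff]
        omega
      have h1 : ind (a = 0 ∧ (0:Int) = 0) ≤ (l.map (fun y => ind (a = 0 ∧ y = 0))).sum := by
        refine List.single_le_sum (fun x hx => ?_) _ (List.mem_map.2 ⟨0, hmem, rfl⟩)
        obtain ⟨y, _, rfl⟩ := List.mem_map.1 hx
        exact ind_nonneg _
      have h3 : ind (a = 0 ∧ (0:Int) = 0) = 1 := by simp [ind, ha]
      have h4 := PF_zero_pairs_nonneg l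
      omega
    · have hcnt : 2 ≤ l.count 0 := by
        rw [count_cons', if_neg ha] at h2
        omega
      have h1 : 0 ≤ (l.map (fun y => ind (a = 0 ∧ y = 0))).sum :=
        List.sum_nonneg (by
          intro x hx
          obtain ⟨y, _, rfl⟩ := List.mem_map.1 hx
          exact ind_nonneg _)
      have := ih hcnt
      omega

lemma PF_zero_pairs_zero (s : List Int) (h : s.count 0 ≤ 1) :
    PF (fun x y => ind (x = 0 ∧ y = 0)) s = 0 := by
  induction s with
  | nil => simp [PF]
  | cons a l ih =>
    simp only [PF]
    by_cases ha : a = 0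
    · have hcnt : l.count 0 = 0 := by
        rw [count_cons', if_pos ha] at h
        omega
      have hnot : ∀ y ∈ l, y ≠ 0 := by
        intro y hy hy0
        have := List.count_pos_iff.2 (hy0 ▸ hy)
        omega
      have h1 : (l.map (fun y => ind (a = 0 ∧ y = 0))).sum = 0 := by
        have : (l.map (fun y => ind (a = 0 ∧ y = 0))) = l.map (fun _ => (0:Int)) :=
          List.map_congr_left (fun y hy => by simp [ind, hnot y hy])
        simp [this]
      have h2 : l.count 0 ≤ 1 := by omega
      rw [h1, ih h2]
      ring
    · have h2 : l.count 0 ≤ 1 := by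
        rw [count_cons', if_neg ha] at h
        omega
      have h1 : (l.map (fun y => ind (a = 0 ∧ y = 0))).sum = 0 := by
        have : (l.map (fun y => ind (a = 0 ∧ y = 0))) = l.map (fun _ => (0:Int)) :=
          List.map_congr_left (fun y _ => by simp [ind, ha])
        simp [this]
      rw [h1, ih h2]
      ring

lemma main_identity (weights : List Int) :
    solution weights = solution_alt weights
      + 3 * PF (fun x y => ind (x = 0 ∧ y = 0)) (PySem.List.sorted weights (fun x => x) false) := by
  have hperm : (PySem.List.sorted weights (fun x => x) false).Perm weights :=
    PySem.List.sorted_perm weights (fun x => x) false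
  have hpw : (PySem.List.sorted weights (fun x => x) false).Pairwise (· ≤ ·) :=
    PySem.List.sorted_pairwise weights (fun x => x)
  rw [solution_eq_PF, solution_alt_eq_PF, PF_sorted_split _ hpw,
      PF_perm gB gB_symm hperm]

-- ===== VERDICT (by name: the statement is the Claim_ definition above) =====
theorem solution_spec : Claim_unchanged_solution := by
  intro weights _ hD
  have hcnt : (PySem.List.sorted weights (fun x => x) false).count 0 ≤ 1 := by
    rw [(PySem.List.sorted_perm weights (fun x => x) false).count_eq]
    unfold D_solution at hD; omega
  rw [main_identity, PF_zero_pairs_zero _ hcnt]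
  ring

theorem solution_changed : Claim_changed_solution := by
  unfold Claim_changed_solution; decide

theorem solution_tight : Claim_exact_solution := by
  intro weights _ hD
  have hcnt : 2 ≤ (PySem.List.sorted weights (fun x => x) false).count 0 := by
    rw [(PySem.List.sorted_perm weights (fun x => x) false).count_eq]
    exact hD
  have := PF_zero_pairs_pos _ hcnt
  rw [main_identity]
  intro h
  omega
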